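-- pv_equiv track=rewrite | github.com/youngeunkwon0405/RL | examples/stress_test_model.py | abbreviate_list
-- ===== SOURCE A (Python) =====
-- def abbreviate_list(array, anchor: int = None) -> str:
--     """Abbreviate a list for display purposes.
--
--     If list length <= 10, returns the full list as a string.
--     If list length > 10 and anchor provided, returns a truncated representation showing:
--     - First three elements
--     - Two elements before and after anchor
--     - Last three elements
--     - Ellipses (...) between non-adjacent sections
--
--     Args:
--         array: List or array-like object to abbreviate
--         anchor: Index position to center the display around (optional)
--
--     Returns:
--         String representation of the abbreviated list
--     """
--     if len(array) <= 10:
--         return str(array)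
--
--     if anchor is None or anchor < 0 or anchor >= len(array):
--         # No valid anchor, just show first and last three elements
--         return f"[{', '.join(str(x) for x in array[:3])}, ..., {', '.join(str(x) for x in array[-3:])}]"
--
--     # Always show first and last three
--     first_three = array[:3]
--     last_three = array[-3:]
--
--     # Calculate anchor window (anchor and two elements on each side)
--     anchor_start = max(3, anchor - 2)  # Don't overlap with first three
--     anchor_end = min(len(array) - 3, anchor + 2 + 1)  # Don't overlap with last three
--     anchor_window = array[anchor_start:anchor_end]
--
--     # Build the result
--     result = [str(x) for x in first_three]
--
--     # Add ellipsis between first three and anchor window if needed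
--     if anchor_start > 3:
--         result.append("...")
--
--     # Add anchor window
--     result.extend([str(x) for x in anchor_window])
--
--     # Add ellipsis between anchor window and last three if needed
--     if anchor_end < len(array) - 3:
--         result.append("...")
--
--     # Add last three if they don't overlap with anchor window
--     if anchor_end <= len(array) - 3:
--         result.extend([str(x) for x in last_three])
--
--     return f"[{', '.join(result)}]"
-- ===== SOURCE B (Python) =====
-- def abbreviate_list(array, anchor: int = None) -> str:
--     n = len(array)
--     if n <= 10:
--         return str(array)
--     if anchor is None or anchor < 0 or anchor >= n:
--         return f"[{', '.join(str(x) for x in array[:3])}, ..., {', '.join(str(x) for x in array[-3:])}]"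
--
--     def keep(i):
--         return i < 3 or i >= n - 3 or (max(3, anchor - 2) <= i < min(n - 3, anchor + 3))
--
--     parts = []
--     pending_gap = False
--     for i, x in enumerate(array):
--         if keep(i):
--             if pending_gap:
--                 parts.append("...")
--                 pending_gap = False
--             parts.append(str(x))
--         else:
--             pending_gap = True
--     return f"[{', '.join(parts)}]"
-- ===== Notes on version B (the rewrite author's own statement) =====
-- stated objective: alternative
-- what changed: B replaces A's slice-and-concatenate construction (three precomputed slices glued with two conditional ellipsis appends) by a single pass over enumerate(array): each index is tested against a keep-predicate (head, anchor window, tail) and a pending-gap flag inserts '...' exactly when a skipped run ends.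
import Mathlib
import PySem

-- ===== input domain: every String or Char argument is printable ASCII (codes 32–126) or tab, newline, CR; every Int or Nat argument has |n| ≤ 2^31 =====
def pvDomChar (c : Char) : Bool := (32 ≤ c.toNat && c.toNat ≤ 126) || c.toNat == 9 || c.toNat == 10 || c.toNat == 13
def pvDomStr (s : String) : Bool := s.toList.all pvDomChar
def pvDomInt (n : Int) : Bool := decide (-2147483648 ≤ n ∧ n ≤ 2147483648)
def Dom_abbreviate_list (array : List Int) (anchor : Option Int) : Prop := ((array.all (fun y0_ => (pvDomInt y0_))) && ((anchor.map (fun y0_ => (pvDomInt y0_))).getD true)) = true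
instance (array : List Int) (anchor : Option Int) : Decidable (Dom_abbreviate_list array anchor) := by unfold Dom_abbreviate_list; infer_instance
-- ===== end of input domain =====

-- B replaces A's slice-and-concatenate construction by a single pass over enumerate(array)
-- with a keep-predicate per index and a pending-gap flag; same behaviour, alternative algorithm.

-- shared helpers: both Pythons contain the literal `str(array)` call and the identical
-- no-valid-anchor f-string, ported once here.
def pyStrIntList (xs : List Int) : String :=
  "[" ++ PySem.Str.join ", " (xs.map PySem.Int.toStr) ++ "]"

def headTailStr (array : List Int) : String :=
  "[" ++ PySem.Str.join ", " ((PySem.List.slice array none (some 3)).map PySem.Int.toStr)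
      ++ ", ..., "
      ++ PySem.Str.join ", " ((PySem.List.slice array (some (-3)) none).map PySem.Int.toStr)
      ++ "]"

-- ===== PORT A =====
def abbreviate_list (array : List Int) (anchor : Option Int) : String :=
  if array.length ≤ 10 then pyStrIntList array
  else
    match anchor with
    | none => headTailStr array
    | some a =>
      if a < 0 ∨ (array.length : Int) ≤ a then headTailStr array
      else
        let first_three := PySem.List.slice array none (some 3)
        let last_three := PySem.List.slice array (some (-3)) none
        let anchor_start := max 3 (a - 2)
        let anchor_end := min ((array.length : Int) - 3) (a + 2 + 1)
        let anchor_window := PySem.List.slice array (some anchor_start) (some anchor_end)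
        let result := first_three.map PySem.Int.toStr
        let result := if anchor_start > 3 then result ++ ["..."] else result
        let result := result ++ anchor_window.map PySem.Int.toStr
        let result := if anchor_end < (array.length : Int) - 3 then result ++ ["..."] else result
        let result := if anchor_end ≤ (array.length : Int) - 3 then result ++ last_three.map PySem.Int.toStr else result
        "[" ++ PySem.Str.join ", " result ++ "]"

-- ===== PORT B =====
-- Source B's keep(i) closure over n and anchor
def pvKeep (n a i : Int) : Bool :=
  i < 3 || n - 3 ≤ i || (max 3 (a - 2) ≤ i && i < min (n - 3) (a + 3))

-- Source B's loop body: state = (parts, pending_gap)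
def pvStep (n a : Int) (acc : List String × Bool) (p : Int × Int) : List String × Bool :=
  if pvKeep n a p.1 then
    ((if acc.2 then acc.1 ++ ["..."] else acc.1) ++ [PySem.Int.toStr p.2], false)
  else (acc.1, true)

def abbreviate_list_alt (array : List Int) (anchor : Option Int) : String :=
  let n : Int := array.length
  if array.length ≤ 10 then pyStrIntList array
  else
    match anchor with
    | none => headTailStr array
    | some a =>
      if a < 0 ∨ n ≤ a then headTailStr array
      else
        let parts := ((PySem.List.enumerate array 0).foldl (pvStep n a) ([], false)).1
        "[" ++ PySem.Str.join ", " parts ++ "]"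

-- ===== PRECONDITION & SPEC =====
def Spec_abbreviate_list (array : List Int) (anchor : Option Int) (out : String) : Prop := out = abbreviate_list_alt array anchor
instance (array : List Int) (anchor : Option Int) (out : String) : Decidable (Spec_abbreviate_list array anchor out) := by unfold Spec_abbreviate_list; infer_instance

-- ===== CLAIM (what is proved, stated in full; the proofs are below) =====
def Claim_equal_abbreviate_list : Prop := ∀ (array : List Int) (anchor : Option Int), Dom_abbreviate_list array anchor → Spec_abbreviate_list array anchor (abbreviate_list array anchor)

-- ===== LEMMAS AND PROOFS =====

-- B's fold over a run of kept indices, entered with no pending gap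
theorem foldKeepAll (n a : Int) (seg : List Int) : ∀ (k : Int) (ps : List String),
    (∀ j : Nat, j < seg.length → pvKeep n a (k + j) = true) →
    (PySem.List.enumerate seg k).foldl (pvStep n a) (ps, false)
      = (ps ++ seg.map PySem.Int.toStr, false) := by
  induction seg with
  | nil => intro k ps _; simp [PySem.List.enumerate_nil]
  | cons x rest ih =>
    intro k ps h
    have h0 : pvKeep n a k = true := by simpa using h 0 (by simp)
    rw [PySem.List.enumerate_cons, List.foldl_cons]
    show (PySem.List.enumerate rest (k+1)).foldl (pvStep n a) (pvStep n a (ps, false) (k, x)) = _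
    have hstep : pvStep n a (ps, false) (k, x) = (ps ++ [PySem.Int.toStr x], false) := by
      simp [pvStep, h0]
    rw [hstep, ih (k+1) (ps ++ [PySem.Int.toStr x]) ?_]
    · simp
    · intro j hj
      have := h (j+1) (by simpa using Nat.succ_lt_succ hj)
      have harith : k + 1 + (j : Int) = k + ((j : Nat) + 1 : Nat) := by push_cast; ring
      rw [harith]; exact this

-- B's fold over a nonempty run of kept indices, entered with a pending gap
theorem foldKeepGap (n a : Int) (seg : List Int) (k : Int) (ps : List String)
    (hne : seg ≠ [])
    (h : ∀ j : Nat, j < seg.length → pvKeep n a (k + j) = true) :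
    (PySem.List.enumerate seg k).foldl (pvStep n a) (ps, true)
      = (ps ++ "..." :: seg.map PySem.Int.toStr, false) := by
  cases seg with
  | nil => exact absurd rfl hne
  | cons x rest =>
    have h0 : pvKeep n a k = true := by simpa using h 0 (by simp)
    rw [PySem.List.enumerate_cons, List.foldl_cons]
    show (PySem.List.enumerate rest (k+1)).foldl (pvStep n a) (pvStep n a (ps, true) (k, x)) = _
    have hstep : pvStep n a (ps, true) (k, x) = ((ps ++ ["..."]) ++ [PySem.Int.toStr x], false) := by
      simp [pvStep, h0]
    rw [hstep, foldKeepAll n a rest (k+1) _ ?_]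
    · simp
    · intro j hj
      have := h (j+1) (by simpa using Nat.succ_lt_succ hj)
      have harith : k + 1 + (j : Int) = k + ((j : Nat) + 1 : Nat) := by push_cast; ring
      rw [harith]; exact this

-- B's fold over a run of skipped indices: parts unchanged, gap flag raised iff the run is nonempty
theorem foldSkip (n a : Int) (seg : List Int) : ∀ (k : Int) (ps : List String) (g : Bool),
    (∀ j : Nat, j < seg.length → pvKeep n a (k + j) = false) →
    (PySem.List.enumerate seg k).foldl (pvStep n a) (ps, g)
      = (ps, g || !decide (seg.length = 0)) := by
  induction seg with
  | nil => intro k ps g _; simp [PySem.List.enumerate_nil]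
  | cons x rest ih =>
    intro k ps g h
    have h0 : pvKeep n a k = false := by simpa using h 0 (by simp)
    rw [PySem.List.enumerate_cons, List.foldl_cons]
    show (PySem.List.enumerate rest (k+1)).foldl (pvStep n a) (pvStep n a (ps, g) (k, x)) = _
    have hstep : pvStep n a (ps, g) (k, x) = (ps, true) := by
      simp [pvStep, h0]
    rw [hstep, ih (k+1) ps true ?_]
    · simp
    · intro j hj
      have := h (j+1) (by simpa using Nat.succ_lt_succ hj)
      have harith : k + 1 + (j : Int) = k + ((j : Nat) + 1 : Nat) := by push_cast; ring
      rw [harith]; exact this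

-- pvKeep as a decidable proposition, for omega
theorem pvKeep_iff (n a i : Int) :
    pvKeep n a i = true ↔ (i < 3 ∨ n - 3 ≤ i ∨ (max 3 (a - 2) ≤ i ∧ i < min (n - 3) (a + 3))) := by
  simp [pvKeep, or_assoc]

theorem pvKeep_eq_false (n a i : Int)
    (h : ¬ (i < 3 ∨ n - 3 ≤ i ∨ (max 3 (a - 2) ≤ i ∧ i < min (n - 3) (a + 3)))) :
    pvKeep n a i = false := by
  rw [← Bool.not_eq_true, pvKeep_iff]; exact h

theorem pvKeep_eq_true (n a i : Int)
    (h : i < 3 ∨ n - 3 ≤ i ∨ (max 3 (a - 2) ≤ i ∧ i < min (n - 3) (a + 3))) :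
    pvKeep n a i = true := (pvKeep_iff n a i).mpr h

-- ===== VERDICT (by name: the statement is the Claim_ definition above) =====
theorem abbreviate_list_spec : Claim_equal_abbreviate_list := by
  intro array anchor _
  unfold Spec_abbreviate_list abbreviate_list abbreviate_list_alt
  by_cases hlen : array.length ≤ 10
  · simp [hlen]
  · simp only [hlen, if_false]
    rcases anchor with _ | a
    · rfl
    · dsimp only
      by_cases hbad : a < 0 ∨ (array.length : Int) ≤ a
      · rw [if_pos hbad, if_pos hbad]
      · rw [if_neg hbad, if_neg hbad]
        rw [show a + 2 + 1 = a + 3 from by ring]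
        have hn : 11 ≤ array.length := by omega
        have ha0 : 0 ≤ a := by omega
        have ha1 : a < (array.length : Int) := by push Not at hbad; omega
        set n : Int := (array.length : Int) with hndef
        set s : Int := max 3 (a - 2) with hsdef
        set e : Int := min (n - 3) (a + 3) with hedef
        have hs3 : 3 ≤ s := by omega
        have hsn : s ≤ n - 3 := by omega
        have he3 : 3 ≤ e := by omega
        have hen : e ≤ n - 3 := by omega
        obtain ⟨s', hs'⟩ : ∃ s' : Nat, (s' : Int) = s := ⟨s.toNat, by omega⟩
        obtain ⟨e', he'⟩ : ∃ e' : Nat, (e' : Int) = e := ⟨e.toNat, by omega⟩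
        have hs'3 : 3 ≤ s' := by omega
        have hs'n : s' ≤ array.length - 3 := by omega
        have he'3 : 3 ≤ e' := by omega
        have he'n : e' ≤ array.length - 3 := by omega
        -- A's slices as take/drop
        have hft : PySem.List.slice array none (some 3) = array.take 3 := by
          rw [PySem.List.slice_to array (by norm_num)]; rfl
        have hlt : PySem.List.slice array (some (-3)) none = array.drop (array.length - 3) :=
          PySem.List.slice_from_neg_ofNat array 3 (by omega)
        have hwin : PySem.List.slice array (some s) (some e)
            = (array.drop s').take (e' - s') := by
          have h1 : s.toNat = s' := by omega
          have h2 : e.toNat = e' := by omega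
          rw [PySem.List.slice_toNat array (by omega) (by omega), h1, h2]
        -- splitting a drop at a later position
        have hsplit : ∀ m k : Nat, k ≤ m →
            (array.drop k).take (m - k) ++ array.drop m = array.drop k := by
          intro m k hk
          have hdd : (array.drop k).drop (m - k) = array.drop m := by
            rw [List.drop_drop]; congr 1; omega
          conv_lhs => rw [← hdd]
          exact List.take_append_drop _ _
        -- segment lengths and offsets
        have l1 : ((array.take 3).length : Int) = 3 := by rw [List.length_take]; push_cast; omega
        have l2 : (((array.drop 3).take (s' - 3)).length : Int) = s - 3 := by
          rw [List.length_take, List.length_drop]; push_cast; omega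
        have l3 : (((array.drop s').take (e' - s')).length : Int) = e - s := by
          rw [List.length_take, List.length_drop]; push_cast; omega
        have l4 : (((array.drop e').take (array.length - 3 - e')).length : Int) = n - 3 - e := by
          rw [List.length_take, List.length_drop]; push_cast; omega
        have lmid : (((array.drop 3).take (array.length - 3 - 3)).length : Int) = n - 6 := by
          rw [List.length_take, List.length_drop]; push_cast; omega
        by_cases hw : s < e
        · -- window nonempty: runs [0,3) keep, [3,s) skip, [s,e) keep, [e,n-3) skip, [n-3,n) keep
          have hd : array = array.take 3 ++ ((array.drop 3).take (s' - 3)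
              ++ ((array.drop s').take (e' - s')
              ++ ((array.drop e').take (array.length - 3 - e') ++ array.drop (array.length - 3)))) := by
            conv_lhs => rw [← List.take_append_drop 3 array,
              ← hsplit s' 3 (by omega), ← hsplit e' s' (by omega),
              ← hsplit (array.length - 3) e' (by omega)]
          have hB : ((PySem.List.enumerate array 0).foldl (pvStep n a) ([], false))
              = ((array.take 3).map PySem.Int.toStr
                  ++ (if 3 < s then ["..."] else [])
                  ++ ((array.drop s').take (e' - s')).map PySem.Int.toStr
                  ++ (if e < n - 3 then ["..."] else [])
                  ++ (array.drop (array.length - 3)).map PySem.Int.toStr, false) := by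
            conv_lhs => rw [hd]
            rw [PySem.List.enumerate_append, PySem.List.enumerate_append,
                PySem.List.enumerate_append, PySem.List.enumerate_append,
                List.foldl_append, List.foldl_append, List.foldl_append, List.foldl_append]
            rw [foldKeepAll n a (array.take 3) 0 []
              (by intro j hj; apply pvKeep_eq_true; omega)]
            simp only [List.nil_append]
            rw [foldSkip n a ((array.drop 3).take (s' - 3))
              (0 + ((array.take 3).length : Int)) ((array.take 3).map PySem.Int.toStr) false
              (by intro j hj; apply pvKeep_eq_false; omega)]
            rw [show (false || !decide ((((array.drop 3).take (s' - 3)).length) = 0))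
                = decide (3 < s) from by
              rw [List.length_take, List.length_drop]
              rcases lt_or_ge 3 s with h | h
              · rw [decide_eq_true h]; simp; omega
              · have hns : ¬ (3 < s) := by omega
                rw [decide_eq_false hns]; simp; omega]
            have hc3ne : (array.drop s').take (e' - s') ≠ [] := by
              intro hnil; rw [hnil] at l3; simp at l3; omega
            have hc5ne : array.drop (array.length - 3) ≠ [] := by
              intro hnil
              have := congrArg List.length hnil
              rw [List.length_drop] at this; simp at this; omega
            have hk3 : ∀ j : Nat, j < ((array.drop s').take (e' - s')).length →
                pvKeep n a (0 + ((array.take 3).length : Int)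
                  + (((array.drop 3).take (s' - 3)).length : Int) + j) = true := by
              intro j hj; apply pvKeep_eq_true; omega
            have hk4 : ∀ j : Nat, j < ((array.drop e').take (array.length - 3 - e')).length →
                pvKeep n a (0 + ((array.take 3).length : Int)
                  + (((array.drop 3).take (s' - 3)).length : Int)
                  + (((array.drop s').take (e' - s')).length : Int) + j) = false := by
              intro j hj; apply pvKeep_eq_false; omega
            have hk5 : ∀ j : Nat, j < (array.drop (array.length - 3)).length →
                pvKeep n a (0 + ((array.take 3).length : Int)
                  + (((array.drop 3).take (s' - 3)).length : Int)
                  + (((array.drop s').take (e' - s')).length : Int)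
                  + (((array.drop e').take (array.length - 3 - e')).length : Int) + j) = true := by
              intro j hj; apply pvKeep_eq_true; omega
            have hflag4 : ∀ g : Bool, (g || !decide ((((array.drop e').take (array.length - 3 - e')).length) = 0))
                = (g || decide (e < n - 3)) := by
              intro g
              rcases lt_or_ge e (n - 3) with h | h
              · rw [decide_eq_true h, List.length_take, List.length_drop]
                have hne : ¬ (min (array.length - 3 - e') (array.length - e') = 0) := by omega
                simp [hne]
              · have hns : ¬ (e < n - 3) := by omega
                rw [decide_eq_false hns, List.length_take, List.length_drop]
                have hz : min (array.length - 3 - e') (array.length - e') = 0 := by omega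
                simp [hz]
            by_cases h3 : 3 < s
            · rw [decide_eq_true h3]
              rw [foldKeepGap n a ((array.drop s').take (e' - s'))
                  (0 + ((array.take 3).length : Int) + (((array.drop 3).take (s' - 3)).length : Int))
                  ((array.take 3).map PySem.Int.toStr) hc3ne hk3]
              rw [foldSkip n a ((array.drop e').take (array.length - 3 - e'))
                  (0 + ((array.take 3).length : Int) + (((array.drop 3).take (s' - 3)).length : Int)
                    + (((array.drop s').take (e' - s')).length : Int))
                  ((array.take 3).map PySem.Int.toStr
                    ++ "..." :: ((array.drop s').take (e' - s')).map PySem.Int.toStr) false hk4]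
              rw [hflag4, Bool.false_or]
              by_cases hgap : e < n - 3
              · rw [decide_eq_true hgap]
                rw [foldKeepGap n a (array.drop (array.length - 3))
                    (0 + ((array.take 3).length : Int) + (((array.drop 3).take (s' - 3)).length : Int)
                      + (((array.drop s').take (e' - s')).length : Int)
                      + (((array.drop e').take (array.length - 3 - e')).length : Int))
                    _ hc5ne hk5]
                rw [if_pos h3, if_pos hgap]
                simp
              · rw [decide_eq_false hgap]
                rw [foldKeepAll n a (array.drop (array.length - 3))
                    (0 + ((array.take 3).length : Int) + (((array.drop 3).take (s' - 3)).length : Int)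
                      + (((array.drop s').take (e' - s')).length : Int)
                      + (((array.drop e').take (array.length - 3 - e')).length : Int))
                    _ hk5]
                rw [if_pos h3, if_neg hgap]
                simp
            · rw [decide_eq_false h3]
              rw [foldKeepAll n a ((array.drop s').take (e' - s'))
                  (0 + ((array.take 3).length : Int) + (((array.drop 3).take (s' - 3)).length : Int))
                  ((array.take 3).map PySem.Int.toStr) hk3]
              rw [foldSkip n a ((array.drop e').take (array.length - 3 - e'))
                  (0 + ((array.take 3).length : Int) + (((array.drop 3).take (s' - 3)).length : Int)
                    + (((array.drop s').take (e' - s')).length : Int))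
                  ((array.take 3).map PySem.Int.toStr
                    ++ ((array.drop s').take (e' - s')).map PySem.Int.toStr) false hk4]
              rw [hflag4, Bool.false_or]
              by_cases hgap : e < n - 3
              · rw [decide_eq_true hgap]
                rw [foldKeepGap n a (array.drop (array.length - 3))
                    (0 + ((array.take 3).length : Int) + (((array.drop 3).take (s' - 3)).length : Int)
                      + (((array.drop s').take (e' - s')).length : Int)
                      + (((array.drop e').take (array.length - 3 - e')).length : Int))
                    _ hc5ne hk5]
                rw [if_neg h3, if_pos hgap]
                simp
              · rw [decide_eq_false hgap]
                rw [foldKeepAll n a (array.drop (array.length - 3))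
                    (0 + ((array.take 3).length : Int) + (((array.drop 3).take (s' - 3)).length : Int)
                      + (((array.drop s').take (e' - s')).length : Int)
                      + (((array.drop e').take (array.length - 3 - e')).length : Int))
                    _ hk5]
                rw [if_neg h3, if_neg hgap]
                simp
          rw [hft, hlt, hwin, hB]
          rw [if_pos hen]
          by_cases h3 : 3 < s <;> by_cases hgap : e < n - 3 <;>
            simp [h3, hgap, List.append_assoc]
        · -- window empty: runs [0,3) keep, [3,n-3) skip, [n-3,n) keep; exactly one ellipsis
          have hd : array = array.take 3 ++ ((array.drop 3).take (array.length - 3 - 3)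
              ++ array.drop (array.length - 3)) := by
            conv_lhs => rw [← List.take_append_drop 3 array,
              ← hsplit (array.length - 3) 3 (by omega)]
          have hc5ne : array.drop (array.length - 3) ≠ [] := by
            intro hnil
            have := congrArg List.length hnil
            rw [List.length_drop] at this; simp at this; omega
          have hB : ((PySem.List.enumerate array 0).foldl (pvStep n a) ([], false))
              = ((array.take 3).map PySem.Int.toStr
                  ++ "..." :: (array.drop (array.length - 3)).map PySem.Int.toStr, false) := by
            conv_lhs => rw [hd]
            rw [PySem.List.enumerate_append, PySem.List.enumerate_append,
                List.foldl_append, List.foldl_append]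
            rw [foldKeepAll n a (array.take 3) 0 []
              (by intro j hj; apply pvKeep_eq_true; omega)]
            simp only [List.nil_append]
            rw [foldSkip n a ((array.drop 3).take (array.length - 3 - 3))
                (0 + ((array.take 3).length : Int)) ((array.take 3).map PySem.Int.toStr) false
                (by intro j hj; apply pvKeep_eq_false; omega)]
            rw [show (false || !decide ((((array.drop 3).take (array.length - 3 - 3)).length) = 0))
                = true from by
              rw [List.length_take, List.length_drop]
              simp
              omega]
            rw [foldKeepGap n a (array.drop (array.length - 3))
                (0 + ((array.take 3).length : Int)
                  + (((array.drop 3).take (array.length - 3 - 3)).length : Int))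
                ((array.take 3).map PySem.Int.toStr) hc5ne
                (by intro j hj; apply pvKeep_eq_true; omega)]
          rw [hft, hlt, hwin, hB]
          rw [show e' - s' = 0 from by omega]
          rw [if_pos hen]
          by_cases h3 : 3 < s
          · have hgap : ¬ e < n - 3 := by omega
            simp [h3, hgap, List.append_assoc]
          · have hgap : e < n - 3 := by omega
            simp [h3, hgap, List.append_assoc]
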